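-- pv_equiv track=rewrite | github.com/pbeens/Pete-s-PDF-to-MD | scripts/extract_outline.py | remove_duplicate_markdown_table_headers
-- ===== SOURCE A (Python) =====
-- def remove_duplicate_markdown_table_headers(text: str) -> str:
--     lines = text.splitlines()
--     if not lines:
--         return text
--
--     header_line = "| Categories | Level 1 | Level 2 | Level 3 | Level 4 |"
--     sep_line = "|---|---|---|---|---|"
--     out = []
--     i = 0
--     while i < len(lines):
--         line = lines[i].strip()
--         next_line = lines[i + 1].strip() if i + 1 < len(lines) else ""
--         if line == header_line and next_line == sep_line:
--             # Only drop header blocks that are duplicated inside an existing table.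
--             # Keep headers that start a new table section after non-table text.
--             prev_nonempty = ""
--             for j in range(len(out) - 1, -1, -1):
--                 probe = out[j].strip()
--                 if probe:
--                     prev_nonempty = probe
--                     break
--
--             next_nonempty = ""
--             for j in range(i + 2, len(lines)):
--                 probe = lines[j].strip()
--                 if probe:
--                     next_nonempty = probe
--                     break
--
--             duplicated_inside_table = prev_nonempty.startswith("|") and next_nonempty.startswith("|")
--             if duplicated_inside_table:
--                 i += 2
--                 continue
--         out.append(lines[i])
--         i += 1
--
--     return "\n".join(out)
-- ===== SOURCE B (Python) =====
-- def remove_duplicate_markdown_table_headers(text: str) -> str: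
--     lines = text.splitlines()
--     if not lines:
--         return text
--     header_line = "| Categories | Level 1 | Level 2 | Level 3 | Level 4 |"
--     sep_line = "|---|---|---|---|---|"
--     n = len(lines)
--     # nxt[i] = nearest stripped non-empty line at or after index i ("" if none)
--     nxt = [""] * (n + 1)
--     for i in range(n - 1, -1, -1):
--         s = lines[i].strip()
--         nxt[i] = s if s else nxt[i + 1]
--     out = []
--     prev = ""  # strip of the last non-empty line appended to out
--     i = 0
--     while i < n:
--         s = lines[i].strip()
--         if (s == header_line and i + 1 < n and lines[i + 1].strip() == sep_line
--                 and prev.startswith("|") and nxt[i + 2].startswith("|")):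
--             i += 2
--             continue
--         out.append(lines[i])
--         if s:
--             prev = s
--         i += 1
--     return "\n".join(out)
-- ===== Notes on version B (the rewrite author's own statement) =====
-- stated objective: alternative
-- what changed: A rescans the output backwards and the input forwards on every header+separator hit; B precomputes a next-non-empty table in one reverse pass and carries the previous non-empty line in a running variable, building the output in a single forward pass with no inner scans.
import Mathlib
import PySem

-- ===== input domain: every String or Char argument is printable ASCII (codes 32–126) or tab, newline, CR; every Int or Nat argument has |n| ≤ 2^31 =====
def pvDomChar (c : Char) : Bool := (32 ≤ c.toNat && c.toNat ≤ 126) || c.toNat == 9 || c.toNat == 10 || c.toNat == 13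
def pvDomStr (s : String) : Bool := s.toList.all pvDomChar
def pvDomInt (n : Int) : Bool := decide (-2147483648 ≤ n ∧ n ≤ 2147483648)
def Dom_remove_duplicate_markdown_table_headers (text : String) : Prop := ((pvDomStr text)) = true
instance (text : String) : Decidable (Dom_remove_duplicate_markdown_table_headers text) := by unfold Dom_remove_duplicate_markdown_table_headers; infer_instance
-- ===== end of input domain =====

-- B replaces A's per-header backward rescan of `out` and forward rescan of `lines` by one precomputed
-- next-non-empty table plus a running previous-non-empty variable (alternative decomposition, same results).

def pvHeaderLine : String := "| Categories | Level 1 | Level 2 | Level 3 | Level 4 |"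
def pvSepLine : String := "|---|---|---|---|---|"

-- ===== PORT A =====
-- A's two inner scans ('for j in range(len(out)-1,-1,-1)' over out, i.e. first non-empty strip of
-- out.reverse, and 'for j in range(i+2, len(lines))', i.e. first non-empty strip of the suffix):
def pvFindNE : List String → String
  | [] => ""
  | x :: xs => let p := PySem.Str.strip x; if p == "" then pvFindNE xs else p

-- the while-loop of A: recursion on the suffix of `lines` starting at i, accumulator `out`
def pvLoopA (out : List String) : List String → List String
  | [] => out
  | l :: rest =>
      let line := PySem.Str.strip l
      let next_line := match rest with | [] => "" | r :: _ => PySem.Str.strip r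
      if line == pvHeaderLine && next_line == pvSepLine then
        let prev_nonempty := pvFindNE out.reverse
        let next_nonempty := pvFindNE rest.tail
        if PySem.Str.startswith prev_nonempty "|" && PySem.Str.startswith next_nonempty "|" then
          pvLoopA out rest.tail
        else
          pvLoopA (out ++ [l]) rest
      else
        pvLoopA (out ++ [l]) rest
  termination_by xs => xs.length
  decreasing_by
  · cases rest <;> simp
  · simp
  · simp

def remove_duplicate_markdown_table_headers (text : String) : String :=
  let lines := PySem.Str.splitlines text
  if lines == [] then text
  else PySem.Str.join "\n" (pvLoopA [] lines)

-- ===== PORT B =====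
-- B's backward pass building nxt: pvBuildNxt xs is [nxt[i], nxt[i+1], …, sentinel ""] for the suffix xs
def pvBuildNxt : List String → List String
  | [] => [""]
  | l :: rest =>
      let r := pvBuildNxt rest
      (let s := PySem.Str.strip l; if s == "" then r.headD "" else s) :: r

-- B's forward pass: `nxts` is the tail of the nxt table aligned with the current suffix
def pvLoopB (prev : String) : List String → List String → List String
  | [], _ => []
  | l :: rest, nxts =>
      let s := PySem.Str.strip l
      if s == pvHeaderLine
          && (match rest with | [] => false | r :: _ => PySem.Str.strip r == pvSepLine)
          && PySem.Str.startswith prev "|"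
          && PySem.Str.startswith ((nxts.drop 2).headD "") "|" then
        pvLoopB prev rest.tail (nxts.drop 2)
      else
        l :: pvLoopB (if s == "" then prev else s) rest (nxts.drop 1)
  termination_by xs _ => xs.length
  decreasing_by
  · cases rest <;> simp
  · simp

def remove_duplicate_markdown_table_headers_alt (text : String) : String :=
  let lines := PySem.Str.splitlines text
  if lines == [] then text
  else PySem.Str.join "\n" (pvLoopB "" lines (pvBuildNxt lines))

-- ===== PRECONDITION & SPEC =====
def Spec_remove_duplicate_markdown_table_headers (text : String) (out : String) : Prop := out = remove_duplicate_markdown_table_headers_alt text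
instance (text : String) (out : String) : Decidable (Spec_remove_duplicate_markdown_table_headers text out) := by unfold Spec_remove_duplicate_markdown_table_headers; infer_instance

-- ===== CLAIM (what is proved, stated in full; the proofs are below) =====
def Claim_equal_remove_duplicate_markdown_table_headers : Prop := ∀ (text : String), Dom_remove_duplicate_markdown_table_headers text → Spec_remove_duplicate_markdown_table_headers text (remove_duplicate_markdown_table_headers text)

-- ===== LEMMAS AND PROOFS =====

theorem pvBuildNxt_headD (xs : List String) : (pvBuildNxt xs).headD "" = pvFindNE xs := by
  induction xs with
  | nil => simp [pvBuildNxt, pvFindNE]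
  | cons x t ih =>
      simp only [pvBuildNxt, pvFindNE, List.headD_cons]
      split <;> simp_all [List.headD]

theorem pvFindNE_snoc (out : List String) (l : String) :
    pvFindNE (out ++ [l]).reverse =
      (if PySem.Str.strip l == "" then pvFindNE out.reverse else PySem.Str.strip l) := by
  simp [pvFindNE]

theorem pvLoop_main : ∀ (n : Nat) (rest : List String), rest.length ≤ n → ∀ (out : List String),
    pvLoopA out rest = out ++ pvLoopB (pvFindNE out.reverse) rest (pvBuildNxt rest) := by
  intro n
  induction n with
  | zero =>
      intro rest h out
      have : rest = [] := List.length_eq_zero_iff.mp (Nat.le_zero.mp h)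
      subst this
      simp [pvLoopA, pvLoopB]
  | succ n ih =>
      intro rest h out
      cases rest with
      | nil => simp [pvLoopA, pvLoopB]
      | cons l rs =>
          rw [pvLoopA.eq_def, pvLoopB.eq_def]
          by_cases h1 : (PySem.Str.strip l == pvHeaderLine) = true
          · cases rs with
            | nil =>
                -- next_line = "" ≠ sep_line; both sides take the append branch
                have hs : (("" : String) == pvSepLine) = false := by decide
                have hrec := ih [] (by simp) (out ++ [l])
                simp only [pvFindNE_snoc] at hrec
                simp only [h1, hs, Bool.and_false, Bool.false_and,
                  if_neg (Bool.false_ne_true), List.tail_nil]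
                rw [hrec]
                simp [pvLoopB]
            | cons r rt =>
                have hd1 : (pvBuildNxt (l :: r :: rt)).drop 1 = pvBuildNxt (r :: rt) := by
                  simp [pvBuildNxt]
                by_cases h2 : (PySem.Str.strip r == pvSepLine) = true
                · -- header followed by separator: the two drop conditions coincide
                  have hdrop : (pvBuildNxt (l :: r :: rt)).drop 2 = pvBuildNxt rt := by
                    simp [pvBuildNxt]
                  have hnxt : ((pvBuildNxt (l :: r :: rt)).drop 2).headD "" = pvFindNE rt := by
                    rw [hdrop, pvBuildNxt_headD]
                  simp only [h1, h2, Bool.true_and, List.tail_cons, hdrop, hd1,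
                    pvBuildNxt_headD, if_true]
                  by_cases h3 : (PySem.Str.startswith (pvFindNE out.reverse) "|"
                      && PySem.Str.startswith (pvFindNE rt) "|") = true
                  · rw [if_pos h3, if_pos h3, ih rt (by simp at h ⊢; omega) out]
                  · rw [if_neg h3, if_neg h3]
                    have hrec := ih (r :: rt) (by simp at h ⊢; omega) (out ++ [l])
                    simp only [pvFindNE_snoc] at hrec
                    rw [hrec]
                    simp
                · have h2' : (PySem.Str.strip r == pvSepLine) = false := by simpa using h2
                  simp only [h1, h2', Bool.and_false, Bool.false_and,
                    if_neg (Bool.false_ne_true), hd1]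
                  have hrec := ih (r :: rt) (by simp at h ⊢; omega) (out ++ [l])
                  simp only [pvFindNE_snoc] at hrec
                  rw [hrec]
                  simp
          · have h1' : (PySem.Str.strip l == pvHeaderLine) = false := by simpa using h1
            simp only [h1', Bool.false_and, if_neg (Bool.false_ne_true)]
            have hd1 : (pvBuildNxt (l :: rs)).drop 1 = pvBuildNxt rs := by
              simp [pvBuildNxt]
            simp only [hd1]
            have hrec := ih rs (by simp at h ⊢; omega) (out ++ [l])
            simp only [pvFindNE_snoc] at hrec
            rw [hrec]
            simp

-- ===== VERDICT (by name: the statement is the Claim_ definition above) =====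
theorem remove_duplicate_markdown_table_headers_spec : Claim_equal_remove_duplicate_markdown_table_headers := by
  intro text _
  unfold Spec_remove_duplicate_markdown_table_headers
  unfold remove_duplicate_markdown_table_headers remove_duplicate_markdown_table_headers_alt
  simp only []
  split
  · rfl
  · have := pvLoop_main (PySem.Str.splitlines text).length (PySem.Str.splitlines text) le_rfl []
    simp only [List.reverse_nil, pvFindNE, List.nil_append] at this
    rw [this]
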